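-- pv_equiv track=rewrite | github.com/CorbanSwain/MIT-Directory-Crawler | directory_parse.py | get_person_event_counts
-- ===== SOURCE A (Python) =====
-- def get_person_event_counts(table):
--     person_list = dict()
--     for entry in table:
--         try:
--             person_list[entry['mit_id']].add(entry['event'])
--         except KeyError:
--             person_list[entry['mit_id']] = set()
--             person_list[entry['mit_id']].add(entry['event'])
--     for k in person_list:
--         person_list[k] = len(person_list[k])
--     return person_list
-- ===== SOURCE B (Python) =====
-- def get_person_event_counts(table):
--     # Flat deduplicated (id, event) pair set (insertion-ordered), then one counting pass.
--     pairs = dict.fromkeys((entry['mit_id'], entry['event']) for entry in table)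
--     counts = dict()
--     for mit_id, _event in pairs:
--         counts[mit_id] = counts.get(mit_id, 0) + 1
--     return counts
-- ===== Notes on version B (the rewrite author's own statement) =====
-- stated objective: simpler
-- what changed: Replaces the dict-of-sets with try/except by a flat insertion-ordered set of (mit_id, event) pairs built in one pass, followed by a plain counting pass over the deduplicated pairs.
import Mathlib
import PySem

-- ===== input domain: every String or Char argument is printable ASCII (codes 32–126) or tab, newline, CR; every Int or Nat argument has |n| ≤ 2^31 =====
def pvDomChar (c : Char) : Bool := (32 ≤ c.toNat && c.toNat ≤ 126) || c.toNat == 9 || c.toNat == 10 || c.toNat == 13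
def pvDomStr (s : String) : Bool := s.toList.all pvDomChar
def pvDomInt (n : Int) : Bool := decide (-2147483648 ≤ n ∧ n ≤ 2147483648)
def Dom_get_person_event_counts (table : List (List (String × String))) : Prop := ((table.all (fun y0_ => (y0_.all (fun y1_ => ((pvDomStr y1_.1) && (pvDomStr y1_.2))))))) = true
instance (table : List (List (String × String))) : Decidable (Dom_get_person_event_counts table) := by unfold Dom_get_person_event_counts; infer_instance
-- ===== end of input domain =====

-- B replaces A's dict-of-sets (with try/except insertion) by a flat deduplicated
-- (id, event) pair list followed by one counting pass: simpler, same cost.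


-- ===== PORT A =====
def get_person_event_counts (table : List (List (String × String))) : List (String × Int) :=
  let person_list : PySem.Dict String (PySem.Set String) :=
    table.foldl (fun d entry =>
      match (PySem.Dict.mk entry).get? "mit_id", (PySem.Dict.mk entry).get? "event" with
      | some mid, some ev =>
        (match d.get? mid with
         | some s => d.insert mid (PySem.Set.add s ev)                    -- try: existing set, add event
         | none   => d.insert mid (PySem.Set.add PySem.Set.empty ev))     -- except KeyError: fresh set, add event
      | _, _ => d   -- a missing 'mit_id'/'event' key raises KeyError in Python: excluded by Pre_
      ) PySem.Dict.empty
  -- for k in person_list: person_list[k] = len(person_list[k])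
  person_list.items.map (fun kv => (kv.1, (PySem.Set.len kv.2 : Int)))

-- ===== PORT B =====
def get_person_event_counts_alt (table : List (List (String × String))) : List (String × Int) :=
  -- pairs = dict.fromkeys((entry['mit_id'], entry['event']) for entry in table)
  let pairs : List (String × String) :=
    PySem.List.dedup (table.filterMap (fun entry =>
      ((PySem.Dict.mk entry).get? "mit_id").bind (fun mid =>
        ((PySem.Dict.mk entry).get? "event").map (fun ev => (mid, ev)))))
      -- a missing key raises KeyError in Python: excluded by Pre_
  -- counting pass: counts[mit_id] = counts.get(mit_id, 0) + 1
  let counts : PySem.Dict String Int :=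
    pairs.foldl (fun d p => d.insert p.1 (d.getD p.1 0 + 1)) PySem.Dict.empty
  counts.items

-- ===== PRECONDITION & SPEC =====
-- Pre_ excludes exactly the rows missing a 'mit_id' or 'event' key, on which the Python A raises KeyError.
def Pre_get_person_event_counts (table : List (List (String × String))) : Prop :=
  (table.all (fun row => row.any (fun p => p.1 == "mit_id") && row.any (fun p => p.1 == "event"))) = true
instance (table : List (List (String × String))) : Decidable (Pre_get_person_event_counts table) := by unfold Pre_get_person_event_counts; infer_instance
def pvWitness_get_person_event_counts : (List (List (String × String))) :=
  [[("mit_id", "901234567"), ("event", "commencement")], [("mit_id", "903333333"), ("event", "career fair")]]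
def Spec_get_person_event_counts (table : List (List (String × String))) (out : List (String × Int)) : Prop := out = get_person_event_counts_alt table
instance (table : List (List (String × String))) (out : List (String × Int)) : Decidable (Spec_get_person_event_counts table out) := by unfold Spec_get_person_event_counts; infer_instance

-- ===== CLAIM (what is proved, stated in full; the proofs are below) =====
def Claim_equal_get_person_event_counts : Prop := ∀ (table : List (List (String × String))), Dom_get_person_event_counts table → Pre_get_person_event_counts table → Spec_get_person_event_counts table (get_person_event_counts table)

-- ===== LEMMAS AND PROOFS =====

-- the list of (id, event) pairs the table yields (a row with a missing key is skipped;
-- under Pre_ there is no such row)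
def pvPairs (table : List (List (String × String))) : List (String × String) :=
  table.filterMap (fun entry =>
    match (PySem.Dict.mk entry).get? "mit_id", (PySem.Dict.mk entry).get? "event" with
    | some mid, some ev => some (mid, ev)
    | _, _ => none)

-- one step of A's loop, on an extracted pair
def pvStepA (d : PySem.Dict String (PySem.Set String)) (p : String × String) : PySem.Dict String (PySem.Set String) :=
  match d.get? p.1 with
  | some s => d.insert p.1 (PySem.Set.add s p.2)
  | none   => d.insert p.1 (PySem.Set.add PySem.Set.empty p.2)

-- A's loop over the table is the pvStepA fold over the extracted pair list
lemma pvFoldA_eq (table : List (List (String × String))) (d : PySem.Dict String (PySem.Set String)) :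
    table.foldl (fun d entry =>
      match (PySem.Dict.mk entry).get? "mit_id", (PySem.Dict.mk entry).get? "event" with
      | some mid, some ev =>
        (match d.get? mid with
         | some s => d.insert mid (PySem.Set.add s ev)
         | none   => d.insert mid (PySem.Set.add PySem.Set.empty ev))
      | _, _ => d) d = (pvPairs table).foldl pvStepA d := by
  induction table generalizing d with
  | nil => rfl
  | cons row rest ih =>
    simp only [List.foldl_cons, pvPairs, List.filterMap_cons]
    cases h1 : (PySem.Dict.mk row).get? "mit_id" <;> cases h2 : (PySem.Dict.mk row).get? "event" <;>
      exact ih _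

-- A's try/except step is a Dict.modify with default ∅
lemma pvStepA_modify (d : PySem.Dict String (PySem.Set String)) (p : String × String) :
    pvStepA d p = d.modify p.1 PySem.Set.empty (fun s => PySem.Set.add s p.2) := by
  cases h : d.get? p.1 <;> simp [pvStepA, PySem.Dict.modify, PySem.Dict.getD, h]

-- the set A accumulates for key k is the update by the snd-projection of k's fiber
lemma pvGetD_foldA (ps : List (String × String)) (d : PySem.Dict String (PySem.Set String)) (k : String) :
    (ps.foldl pvStepA d).getD k PySem.Set.empty
      = PySem.Set.update (d.getD k PySem.Set.empty) ((ps.filter (fun p => p.1 == k)).map (·.2)) := by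
  induction ps generalizing d with
  | nil => simp [PySem.Set.update_nil]
  | cons p ps ih =>
    rw [List.foldl_cons, pvStepA_modify, ih]
    by_cases hk : k = p.1
    · subst hk
      rw [PySem.Dict.getD_modify]
      simp [PySem.Set.update_cons]
    · rw [PySem.Dict.getD_modify]
      simp [hk, Ne.symm hk]

-- an association list with Nodup keys is the map over its keys of (k, getD k)
lemma pvItems_eq_map_keys {ν : Type} (l : List (String × ν)) (h : (l.map (·.1)).Nodup) (d0 : ν) :
    l = (l.map (·.1)).map (fun k => (k, (PySem.Dict.mk l).getD k d0)) := by
  induction l with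
  | nil => rfl
  | cons kv t ih =>
    obtain ⟨k, v⟩ := kv
    simp only [List.map_cons, List.nodup_cons] at h ⊢
    refine List.cons_eq_cons.mpr ⟨?_, ?_⟩
    · simp [PySem.Dict.getD, PySem.Dict.get?_mk_cons]
    · rw [List.map_congr_left (fun k' hk' => ?_), ← ih h.2]
      have hne : (k == k') = false := by
        simp only [beq_eq_false_iff_ne]; rintro rfl; exact h.1 hk'
      simp [PySem.Dict.getD, PySem.Dict.get?_mk_cons, hne]

-- dedup commutes with mapping over an already-deduplicated list
lemma pvDedup_map {α β : Type} [BEq α] [LawfulBEq α] [BEq β] [LawfulBEq β] (l : List α) (f : α → β) :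
    PySem.List.dedup (l.map f) = PySem.List.dedup ((PySem.List.dedup l).map f) := by
  induction l using List.reverseRecOn with
  | nil => rfl
  | append_singleton xs x ih =>
    simp only [PySem.List.dedup] at *
    rw [List.map_append, List.map_singleton, PySem.Set.ofList_append_singleton,
        PySem.Set.ofList_append_singleton]
    by_cases hx : x ∈ xs
    · rw [PySem.Set.add_of_mem ((PySem.Set.mem_ofList xs x).2 hx),
          PySem.Set.add_of_mem ((PySem.Set.mem_ofList (xs.map f) (f x)).2 (List.mem_map_of_mem hx)), ih]
    · rw [PySem.Set.add_of_not_mem (s := PySem.Set.ofList xs) (by simpa [PySem.Set.mem_ofList] using hx),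
          List.map_append, List.map_singleton, PySem.Set.ofList_append_singleton, ih]

-- the fiber of a deduplicated pair list over a fixed key, projected to values
lemma pvFiber_dedup (ps : List (String × String)) (k : String) :
    ((PySem.List.dedup ps).filter (fun p => p.1 == k)).map (·.2)
      = PySem.List.dedup ((ps.filter (fun p => p.1 == k)).map (·.2)) := by
  induction ps using List.reverseRecOn with
  | nil => rfl
  | append_singleton xs x ih =>
    simp only [PySem.List.dedup] at *
    rw [PySem.Set.ofList_append_singleton]
    by_cases hx : x ∈ xs
    · rw [PySem.Set.add_of_mem ((PySem.Set.mem_ofList xs x).2 hx), ih,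
          List.filter_append, List.map_append]
      by_cases hk : x.1 = k
      · have hm : x.2 ∈ (xs.filter (fun p => p.1 == k)).map (·.2) :=
          List.mem_map_of_mem (List.mem_filter.2 ⟨hx, by simp [hk]⟩)
        have hfx : (List.filter (fun p => p.1 == k) [x]).map (·.2) = [x.2] := by simp [hk]
        rw [hfx, PySem.Set.ofList_append_singleton,
            PySem.Set.add_of_mem ((PySem.Set.mem_ofList _ _).2 hm)]
      · have hfx : List.filter (fun p => p.1 == k) [x] = [] := by simp [hk]
        rw [hfx]
        simp
    · rw [PySem.Set.add_of_not_mem (by simpa [PySem.Set.mem_ofList] using hx),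
          List.filter_append, List.map_append, List.filter_append, List.map_append, ih]
      by_cases hk : x.1 = k
      · have hnotin : x.2 ∉ (xs.filter (fun p => p.1 == k)).map (·.2) := by
          intro hmem
          obtain ⟨q, hq, hq2⟩ := List.mem_map.1 hmem
          rw [List.mem_filter] at hq
          have hqx : q = x := by
            obtain ⟨q1, q2⟩ := q
            obtain ⟨x1, x2⟩ := x
            simp only [beq_iff_eq] at hq hq2 hk ⊢
            exact Prod.ext (by rw [hq.2, hk]) hq2
          exact hx (hqx ▸ hq.1)
        have hfx : (List.filter (fun p => p.1 == k) [x]).map (·.2) = [x.2] := by simp [hk]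
        rw [hfx, PySem.Set.ofList_append_singleton,
            PySem.Set.add_of_not_mem (by simpa [PySem.Set.mem_ofList] using hnotin)]
      · have hfx : List.filter (fun p => p.1 == k) [x] = [] := by simp [hk]
        rw [hfx]
        simp

-- main equality (holds for every table: both ports skip a key-less row)
lemma pvMain (table : List (List (String × String))) :
    get_person_event_counts table = get_person_event_counts_alt table := by
  unfold get_person_event_counts get_person_event_counts_alt
  simp only []
  rw [pvFoldA_eq]
  have hPairs : (table.filterMap (fun entry =>
      ((PySem.Dict.mk entry).get? "mit_id").bind (fun mid =>
        ((PySem.Dict.mk entry).get? "event").map (fun ev => (mid, ev)))))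
      = pvPairs table := by
    unfold pvPairs
    congr 1
    funext entry
    cases (PySem.Dict.mk entry).get? "mit_id" <;> cases (PySem.Dict.mk entry).get? "event" <;> rfl
  rw [hPairs]
  set ps := pvPairs table with hps
  set dA := ps.foldl pvStepA PySem.Dict.empty with hdA
  -- A's keys are the deduplicated ids
  have hfun : pvStepA = fun d p => PySem.Dict.modify d p.1 PySem.Set.empty (fun s => PySem.Set.add s p.2) :=
    funext fun d => funext fun p => pvStepA_modify d p
  have hkeys : dA.keys = PySem.Set.ofList (ps.map (·.1)) := by
    rw [hdA, hfun]
    rw [PySem.Dict.keys_foldl_modify_key ps (fun p => p.1) PySem.Set.empty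
      (fun _ p s => PySem.Set.add s p.2) PySem.Dict.empty]
    rw [show (PySem.Dict.empty : PySem.Dict String (PySem.Set String)).keys = [] from rfl,
      PySem.Set.update_nil_left]
  have hnodup : (dA.items.map (·.1)).Nodup := by
    rw [show dA.items.map (·.1) = dA.keys from rfl, hkeys]
    exact PySem.Set.nodup_ofList _
  -- A's items as a map over its keys
  have hitems : dA.items = (dA.items.map (·.1)).map
      (fun k => (k, dA.getD k PySem.Set.empty)) := by
    have h := pvItems_eq_map_keys dA.items hnodup PySem.Set.empty
    rwa [show PySem.Dict.mk dA.items = dA from rfl] at h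
  rw [hitems, List.map_map, show dA.items.map (·.1) = dA.keys from rfl, hkeys]
  -- B's counts is Counter of the ids of the deduplicated pairs
  have hB : ∀ (l : List (String × String)),
      l.foldl (fun d p => d.insert p.1 (d.getD p.1 0 + 1)) (PySem.Dict.empty : PySem.Dict String Int)
        = PySem.Dict.counter (l.map (·.1)) := by
    intro l
    rw [← PySem.Dict.foldl_insert_getD_add_one_eq_counter, List.foldl_map]
  rw [hB, PySem.Dict.items_counter]
  -- same key list on both sides
  have hkeylist : PySem.Set.ofList ((PySem.List.dedup ps).map (·.1)) = PySem.Set.ofList (ps.map (·.1)) := by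
    have h := pvDedup_map ps (fun p : String × String => p.1)
    simp only [PySem.List.dedup] at h
    exact h.symm
  rw [hkeylist]
  -- pointwise equality of the values
  refine List.map_congr_left (fun k hk => ?_)
  have hval : dA.getD k PySem.Set.empty
      = PySem.Set.ofList ((ps.filter (fun p => p.1 == k)).map (·.2)) := by
    rw [hdA, pvGetD_foldA]
    rw [show (PySem.Dict.empty : PySem.Dict String (PySem.Set String)).getD k PySem.Set.empty
          = PySem.Set.empty from rfl]
    rw [show (PySem.Set.empty : PySem.Set String) = [] from rfl, PySem.Set.update_nil_left]
  have hcount : List.count k ((PySem.List.dedup ps).map (·.1))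
      = (PySem.Set.ofList ((ps.filter (fun p => p.1 == k)).map (·.2))).length := by
    rw [List.count_eq_countP, List.countP_map, List.countP_eq_length_filter]
    have : ((PySem.List.dedup ps).filter ((fun x => x == k) ∘ fun p : String × String => p.1))
        = (PySem.List.dedup ps).filter (fun p => p.1 == k) := rfl
    rw [this, ← List.length_map (f := fun p : String × String => p.2), pvFiber_dedup]
    simp only [PySem.List.dedup]
  simp only [Function.comp]
  refine Prod.ext rfl ?_
  simp only [hval, PySem.Set.len]
  rw [hcount]

-- ===== VERDICT (by name: the statement is the Claim_ definition above) =====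
theorem get_person_event_counts_spec : Claim_equal_get_person_event_counts := by
  intro table _ _
  unfold Spec_get_person_event_counts
  exact pvMain table
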